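-- pv_equiv track=rewrite | github.com/UpasanaDutta98/scaling_laws_repo | Code/07_store_DCSBM_RemoveNonSimpleEdges.py | sanity_check_selfLoops_multiEdges
-- ===== SOURCE A (Python) =====
-- def sanity_check_selfLoops_multiEdges(Adj_list):
--     selfLoop_found_flag = 0
--     multiEdge_found_flag = 0
--
--     neighborSet = [set() for node in range(len(Adj_list))]
--
--     for node in range(len(Adj_list)):
--         for neighbor in Adj_list[node]:
--             if node == neighbor:
--                 selfLoop_found_flag = 1
--             if neighbor in neighborSet[node]:
--                 multiEdge_found_flag = 1
--
--             neighborSet[node].add(neighbor)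
--
--     return selfLoop_found_flag, multiEdge_found_flag
-- ===== SOURCE B (Python) =====
-- def sanity_check_selfLoops_multiEdges(Adj_list):
--     self_loop = any(node in neighbors for node, neighbors in enumerate(Adj_list))
--     multi_edge = any(len(neighbors) != len(set(neighbors)) for neighbors in Adj_list)
--     return int(self_loop), int(multi_edge)
-- ===== Notes on version B (the rewrite author's own statement) =====
-- stated objective: simpler
-- what changed: Replaces the stateful nested loops that maintain a per-node seen-set and two mutable flags with two independent any() passes: self-loops via enumerate+membership, multi-edges via a len(xs) != len(set(xs)) whole-list comparison.
import Mathlib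
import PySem

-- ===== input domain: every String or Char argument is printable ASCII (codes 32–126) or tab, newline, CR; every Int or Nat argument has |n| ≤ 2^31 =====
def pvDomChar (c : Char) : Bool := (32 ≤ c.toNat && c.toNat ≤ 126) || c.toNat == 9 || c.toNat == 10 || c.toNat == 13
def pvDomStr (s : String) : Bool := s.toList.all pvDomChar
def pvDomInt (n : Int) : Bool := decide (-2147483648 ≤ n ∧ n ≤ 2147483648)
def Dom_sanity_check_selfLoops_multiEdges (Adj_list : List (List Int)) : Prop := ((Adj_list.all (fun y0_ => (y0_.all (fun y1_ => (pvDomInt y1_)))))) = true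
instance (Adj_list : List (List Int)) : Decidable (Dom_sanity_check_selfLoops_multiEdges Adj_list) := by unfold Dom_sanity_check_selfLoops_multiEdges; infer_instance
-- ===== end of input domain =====

-- B replaces A's stateful nested loops (per-node seen-set + mutable flags) with two
-- independent any() passes (enumerate membership; len vs len-of-set): simpler decomposition.


-- ===== PORT A =====
-- Literal transliteration: flags start at 0, a list of per-node seen-sets, nested loops
-- 'for node in range(len(Adj_list)): for neighbor in Adj_list[node]: …'.
def sanity_check_selfLoops_multiEdges (Adj_list : List (List Int)) : Int × Int :=
  let init : Int × Int × List (PySem.Set Int) :=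
    (0, 0, (List.range Adj_list.length).map (fun _ => PySem.Set.empty))
  let st := (PySem.List.pyRange 0 (Adj_list.length : Int)).foldl
    (fun (st : Int × Int × List (PySem.Set Int)) node =>
      (PySem.List.pyGetD Adj_list node []).foldl
        (fun (st2 : Int × Int × List (PySem.Set Int)) neighbor =>
          let sl := if node == neighbor then 1 else st2.1
          let me := if PySem.Set.contains (PySem.List.pyGetD st2.2.2 node PySem.Set.empty) neighbor then 1 else st2.2.1
          (sl, me,
            PySem.List.pySetD st2.2.2 node
              (PySem.Set.add (PySem.List.pyGetD st2.2.2 node PySem.Set.empty) neighbor)))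
        st)
    init
  (st.1, st.2.1)

-- ===== PORT B =====
-- Transliteration of Source B: two independent any-passes, then int() of each bool.
def sanity_check_selfLoops_multiEdges_alt (Adj_list : List (List Int)) : Int × Int :=
  let self_loop := (PySem.List.enumerate Adj_list).any (fun p => p.2.contains p.1)
  let multi_edge := Adj_list.any (fun nbrs => decide (nbrs.length ≠ (PySem.Set.ofList nbrs).length))
  ((if self_loop then 1 else 0), (if multi_edge then 1 else 0))

-- ===== PRECONDITION & SPEC =====
def Spec_sanity_check_selfLoops_multiEdges (Adj_list : List (List Int)) (out : Int × Int) : Prop := out = sanity_check_selfLoops_multiEdges_alt Adj_list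
instance (Adj_list : List (List Int)) (out : Int × Int) : Decidable (Spec_sanity_check_selfLoops_multiEdges Adj_list out) := by unfold Spec_sanity_check_selfLoops_multiEdges; infer_instance

-- ===== CLAIM (what is proved, stated in full; the proofs are below) =====
def Claim_equal_sanity_check_selfLoops_multiEdges : Prop := ∀ (Adj_list : List (List Int)), Dom_sanity_check_selfLoops_multiEdges Adj_list → Spec_sanity_check_selfLoops_multiEdges Adj_list (sanity_check_selfLoops_multiEdges Adj_list)

-- ===== LEMMAS AND PROOFS =====

-- 'a duplicate occurs while folding the neighbours into the seen-set S'
def dupFrom (S : PySem.Set Int) : List Int → Bool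
  | [] => false
  | x :: xs => S.contains x || dupFrom (S.add x) xs

theorem length_add (S : PySem.Set Int) (x : Int) :
    (S.add x).length = if S.contains x then S.length else S.length + 1 := by
  simp [PySem.Set.add]; split <;> simp

theorem length_update_le (l : List Int) (S : PySem.Set Int) :
    (S.update l).length ≤ S.length + l.length := by
  induction l generalizing S with
  | nil => simp [PySem.Set.update]
  | cons x xs ih =>
      have h := ih (S.add x)
      have hlen := length_add S x
      simp only [PySem.Set.update, List.foldl_cons, List.length_cons] at *
      split at hlen <;> omega

theorem dupFrom_eq_false_iff (l : List Int) (S : PySem.Set Int) :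
    dupFrom S l = false ↔ (S.update l).length = S.length + l.length := by
  induction l generalizing S with
  | nil => simp [dupFrom, PySem.Set.update]
  | cons x xs ih =>
      have hle := length_update_le xs (S.add x)
      have hih := ih (S.add x)
      simp only [PySem.Set.update, List.foldl_cons, List.length_cons] at hle hih ⊢
      by_cases hc : S.contains x = true
      · have hlen : (S.add x).length = S.length := by rw [length_add, if_pos hc]
        simp only [dupFrom, hc, Bool.true_or]
        constructor
        · intro h; simp at h
        · intro h; exfalso; omega
      · have hcf : S.contains x = false := by simpa using hc
        have hlen : (S.add x).length = S.length + 1 := by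
          rw [length_add, hcf]; simp
        simp only [dupFrom, hcf, Bool.false_or]
        rw [hih]
        omega

theorem dupFrom_empty (l : List Int) :
    dupFrom PySem.Set.empty l = decide (l.length ≠ (PySem.Set.ofList l).length) := by
  have h := dupFrom_eq_false_iff l PySem.Set.empty
  have hle := length_update_le l PySem.Set.empty
  have hof : PySem.Set.update PySem.Set.empty l = PySem.Set.ofList l := rfl
  rw [hof] at h hle
  simp only [PySem.Set.empty, List.length_nil, Nat.zero_add] at h hle ⊢
  cases hd : dupFrom [] l
  · have he := h.mp hd
    simp [he]
  · have hne : l.length ≠ (PySem.Set.ofList l).length := by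
      intro he
      have h2 := h.mpr he.symm
      rw [hd] at h2
      simp at h2
    simp [hne]

theorem flag_step (a b : Bool) (me : Int) :
    (if b = true then (1 : Int) else if a = true then 1 else me)
      = if (a || b) = true then 1 else me := by
  cases a <;> cases b <;> simp

-- the inner 'for neighbor in nbrs' loop of A, characterised
theorem inner_spec (nbrs : List Int) (node : Nat) (sl me : Int)
    (sets : List (PySem.Set Int)) (h : node < sets.length) :
    nbrs.foldl
      (fun (st2 : Int × Int × List (PySem.Set Int)) neighbor =>
        ((if (node : Int) == neighbor then 1 else st2.1),
         (if PySem.Set.contains (PySem.List.pyGetD st2.2.2 (node : Int) PySem.Set.empty) neighbor then 1 else st2.2.1),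
         PySem.List.pySetD st2.2.2 (node : Int)
           (PySem.Set.add (PySem.List.pyGetD st2.2.2 (node : Int) PySem.Set.empty) neighbor)))
      (sl, me, sets)
    = ((if (node : Int) ∈ nbrs then 1 else sl),
       (if dupFrom (PySem.List.pyGetD sets (node : Int) PySem.Set.empty) nbrs then 1 else me),
       PySem.List.pySetD sets (node : Int)
         (PySem.Set.update (PySem.List.pyGetD sets (node : Int) PySem.Set.empty) nbrs)) := by
  induction nbrs generalizing sl me sets with
  | nil => simp [dupFrom, PySem.Set.update, PySem.List.pySetD_natCast,
      PySem.List.pyGetD_natCast, List.getD, List.getElem?_eq_getElem h, List.set_getElem_self]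
  | cons x xs ih =>
      rw [List.foldl_cons]
      have h' : node < (PySem.List.pySetD sets (node : Int)
          (PySem.Set.add (PySem.List.pyGetD sets (node : Int) PySem.Set.empty) x)).length := by
        rw [PySem.List.length_pySetD]; exact h
      rw [ih _ _ _ h']
      have hget := PySem.List.pyGetD_pySetD_natCast sets node node
        (PySem.Set.add (PySem.List.pyGetD sets (node : Int) PySem.Set.empty) x) PySem.Set.empty h
      rw [if_pos rfl] at hget
      rw [hget]
      refine Prod.ext ?_ (Prod.ext ?_ ?_)
      · simp only [List.mem_cons, beq_iff_eq]
        by_cases h1 : (node : Int) ∈ xs <;> by_cases h2 : (node : Int) = x <;> simp [h1, h2]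
      · simp only [dupFrom]
        exact flag_step _ _ me
      · simp only [PySem.List.pySetD_natCast, List.set_set]
        rfl

theorem or_flag (P Q : Prop) [Decidable P] [Decidable Q] :
    (if Q then (1 : Int) else if P then 1 else 0) = if P ∨ Q then 1 else 0 := by
  by_cases hp : P <;> by_cases hq : Q <;> simp [hp, hq]

-- flags of A after the first k outer iterations
def slF (l : List (List Int)) (k : Nat) : Int :=
  if (List.range k).any (fun i => decide ((i : Int) ∈ l.getD i [])) then 1 else 0
def meF (l : List (List Int)) (k : Nat) : Int :=
  if (List.range k).any (fun i => dupFrom PySem.Set.empty (l.getD i [])) then 1 else 0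

theorem outer_spec (l : List (List Int)) (k : Nat) (hk : k ≤ l.length) :
    ∃ sets : List (PySem.Set Int),
      ((List.range k).map (fun (i : Nat) => (i : Int))).foldl
        (fun (st : Int × Int × List (PySem.Set Int)) node =>
          (PySem.List.pyGetD l node []).foldl
            (fun (st2 : Int × Int × List (PySem.Set Int)) neighbor =>
              ((if node == neighbor then 1 else st2.1),
               (if PySem.Set.contains (PySem.List.pyGetD st2.2.2 node PySem.Set.empty) neighbor then 1 else st2.2.1),
               PySem.List.pySetD st2.2.2 node
                 (PySem.Set.add (PySem.List.pyGetD st2.2.2 node PySem.Set.empty) neighbor)))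
            st)
        (0, 0, (List.range l.length).map (fun _ => PySem.Set.empty))
      = (slF l k, meF l k, sets)
      ∧ sets.length = l.length
      ∧ ∀ j : Nat, k ≤ j → PySem.List.pyGetD sets (j : Int) PySem.Set.empty = PySem.Set.empty := by
  induction k with
  | zero =>
      refine ⟨_, rfl, by simp, ?_⟩
      intro j _
      simp [PySem.List.pyGetD_natCast, List.getD]
  | succ k ih =>
      obtain ⟨sets, heq, hlen, hempty⟩ := ih (Nat.le_of_succ_le hk)
      have hkl : k < l.length := hk
      refine ⟨PySem.List.pySetD sets (k : Int)
        (PySem.Set.update PySem.Set.empty (l.getD k [])), ?_, ?_, ?_⟩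
      · rw [List.range_succ, List.map_append, List.foldl_append, heq]
        simp only [List.map_cons, List.map_nil, List.foldl_cons, List.foldl_nil]
        rw [inner_spec _ k _ _ sets (hlen ▸ hkl)]
        rw [hempty k le_rfl]
        rw [PySem.List.pyGetD_natCast l k []]
        congr 1
        · simp only [slF, List.range_succ, List.any_append, List.any_cons, List.any_nil,
            Bool.or_false, Bool.or_eq_true, decide_eq_true_eq]
          exact or_flag _ _
        congr 1
        · simp only [meF, List.range_succ, List.any_append, List.any_cons, List.any_nil,
            Bool.or_false, Bool.or_eq_true]
          exact or_flag _ _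
      · rw [PySem.List.length_pySetD]; exact hlen
      · intro j hj
        have hjk : j ≠ k := by omega
        rw [PySem.List.pyGetD_pySetD_natCast _ _ _ _ _ (hlen ▸ hkl)]
        rw [if_neg hjk]
        exact hempty j (by omega)

-- bridge: B's enumerate-pass equals the range-indexed any
theorem enum_any (l : List (List Int)) :
    (PySem.List.enumerate l).any (fun p => p.2.contains p.1)
      = (List.range l.length).any (fun i => decide ((i : Int) ∈ l.getD i [])) := by
  rw [Bool.eq_iff_iff]
  simp only [List.any_eq_true, List.mem_range]
  constructor
  · rintro ⟨p, hp, hc⟩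
    obtain ⟨i, hi, rfl⟩ := List.mem_iff_getElem.mp hp
    rw [PySem.List.length_enumerate] at hi
    rw [PySem.List.getElem_enumerate _ _ _ (by rw [PySem.List.length_enumerate]; exact hi)] at hc
    refine ⟨i, hi, ?_⟩
    rw [List.getD_eq_getElem l [] hi]
    simpa using hc
  · rintro ⟨i, hi, hc⟩
    rw [List.getD_eq_getElem l [] hi] at hc
    refine ⟨((i : Int), l[i]), ?_, by simpa using hc⟩
    have he : ((i : Int), l[i])
        = (PySem.List.enumerate l)[i]'(by rw [PySem.List.length_enumerate]; exact hi) := by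
      rw [PySem.List.getElem_enumerate]; simp
    rw [he]
    exact List.getElem_mem _

-- bridge: B's per-row any equals the range-indexed any
theorem row_any (l : List (List Int)) :
    l.any (fun nbrs => decide (nbrs.length ≠ (PySem.Set.ofList nbrs).length))
      = (List.range l.length).any (fun i => dupFrom PySem.Set.empty (l.getD i [])) := by
  rw [Bool.eq_iff_iff]
  simp only [List.any_eq_true, List.mem_range]
  constructor
  · rintro ⟨nbrs, hmem, hc⟩
    obtain ⟨i, hi, rfl⟩ := List.mem_iff_getElem.mp hmem
    refine ⟨i, hi, ?_⟩
    rw [List.getD_eq_getElem l [] hi, dupFrom_empty]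
    exact hc
  · rintro ⟨i, hi, hc⟩
    rw [List.getD_eq_getElem l [] hi, dupFrom_empty] at hc
    exact ⟨l[i], List.getElem_mem _, hc⟩

-- ===== VERDICT (by name: the statement is the Claim_ definition above) =====
theorem sanity_check_selfLoops_multiEdges_spec : Claim_equal_sanity_check_selfLoops_multiEdges := by
  intro l _
  unfold Spec_sanity_check_selfLoops_multiEdges
  obtain ⟨sets, heq, -, -⟩ := outer_spec l l.length le_rfl
  unfold sanity_check_selfLoops_multiEdges sanity_check_selfLoops_multiEdges_alt
  simp only [PySem.List.pyRange_zero_natCast]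
  rw [heq]
  simp only [slF, meF, enum_any, row_any]
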